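-- pv_equiv track=rewrite | github.com/pypi-data/pypi-mirror-392 | packages/alprina-cli/alprina_cli-0.4.2.tar.gz/alprina_cli-0.4.2/src/alprina_cli/security_engine.py | _parse_alprina_result
-- ===== SOURCE A (Python) =====
-- from typing import Dict, Any, List, Optional
--
-- def _parse_alprina_result(result: str, metadata: dict) -> List[Dict[str, Any]]:
--     """
--     Parse Alprina agent result into structured findings.
--
--     Args:
--         result: Agent response string
--         metadata: Original metadata
--
--     Returns:
--         List of finding dictionaries
--     """
--     findings = []
--
--     # Simple parsing - look for severity keywords and extract findings
--     # This is a basic parser - can be enhanced based on actual Alprina agent output format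
--
--     lines = result.split('\n')
--     current_finding = None
--
--     for line in lines:
--         line_lower = line.lower()
--
--         # Check for severity markers
--         if any(sev in line_lower for sev in ['high', 'critical', 'severe']):
--             if current_finding:
--                 findings.append(current_finding)
--             current_finding = {
--                 "severity": "HIGH",
--                 "type": "Security Issue",
--                 "description": line.strip(),
--                 "location": metadata.get("file", "unknown"),
--                 "line": None
--             }
--         elif any(sev in line_lower for sev in ['medium', 'moderate']):
--             if current_finding:
--                 findings.append(current_finding)
--             current_finding = {
--                 "severity": "MEDIUM",
--                 "type": "Security Issue",
--                 "description": line.strip(),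
--                 "location": metadata.get("file", "unknown"),
--                 "line": None
--             }
--         elif any(sev in line_lower for sev in ['low', 'minor', 'info']):
--             if current_finding:
--                 findings.append(current_finding)
--             current_finding = {
--                 "severity": "LOW",
--                 "type": "Security Issue",
--                 "description": line.strip(),
--                 "location": metadata.get("file", "unknown"),
--                 "line": None
--             }
--         elif current_finding and line.strip():
--             # Add to current finding description
--             current_finding["description"] += " " + line.strip()
--
--     if current_finding:
--         findings.append(current_finding)
--
--     # If no findings parsed, create a summary finding
--     if not findings and len(result) > 50:
--         findings.append({
--             "severity": "INFO",
--             "type": "Analysis Complete",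
--             "description": result[:500],  # First 500 chars
--             "location": metadata.get("file", "unknown"),
--             "line": None
--         })
--
--     return findings
-- ===== SOURCE B (Python) =====
-- def _parse_alprina_result(result, metadata):
--     """Two-pass parser: classify lines, segment into blocks, then render findings."""
--
--     def classify(line):
--         ll = line.lower()
--         for sev, kws in (("HIGH", ("high", "critical", "severe")),
--                          ("MEDIUM", ("medium", "moderate")),
--                          ("LOW", ("low", "minor", "info"))):
--             if any(k in ll for k in kws):
--                 return sev
--         return None
--
--     # pass 1: segment lines into blocks (severity, header line, continuation lines)
--     blocks = []
--     for line in result.split('\n'):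
--         sev = classify(line)
--         if sev is not None:
--             blocks.append((sev, line, []))
--         elif blocks and line.strip():
--             blocks[-1][2].append(line)
--
--     # pass 2: render each block into a finding dict
--     findings = [{
--         "severity": sev,
--         "type": "Security Issue",
--         "description": " ".join([header.strip()] + [c.strip() for c in conts]),
--         "location": metadata.get("file", "unknown"),
--         "line": None,
--     } for sev, header, conts in blocks]
--
--     if not findings and len(result) > 50:
--         findings.append({
--             "severity": "INFO",
--             "type": "Analysis Complete",
--             "description": result[:500],
--             "location": metadata.get("file", "unknown"),
--             "line": None,
--         })
--     return findings
-- ===== Notes on version B (the rewrite author's own statement) =====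
-- stated objective: alternative
-- what changed: Replaces A's single accumulating loop over a mutable current-finding dict (description +=) with a two-pass decomposition: a line classifier plus segmentation into (severity, header, continuations) blocks, then a rendering pass that joins each block's stripped lines into the description.
import Mathlib
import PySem

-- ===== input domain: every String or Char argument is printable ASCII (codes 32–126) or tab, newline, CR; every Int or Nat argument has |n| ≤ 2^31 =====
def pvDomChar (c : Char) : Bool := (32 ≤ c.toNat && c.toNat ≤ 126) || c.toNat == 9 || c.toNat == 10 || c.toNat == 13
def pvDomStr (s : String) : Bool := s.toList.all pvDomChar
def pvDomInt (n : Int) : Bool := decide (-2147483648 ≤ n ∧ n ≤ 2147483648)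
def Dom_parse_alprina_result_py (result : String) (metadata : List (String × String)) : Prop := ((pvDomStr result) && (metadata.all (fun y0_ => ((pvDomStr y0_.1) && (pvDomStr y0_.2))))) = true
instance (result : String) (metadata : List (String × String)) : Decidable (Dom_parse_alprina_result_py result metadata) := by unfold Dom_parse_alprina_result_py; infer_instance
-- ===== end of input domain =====

-- B replaces A's single accumulating loop (mutable current-finding dict with description +=)
-- by a two-pass decomposition: classify/segment lines into blocks, then render each block;
-- objective: alternative (same cost, different structure).

-- ===== PORT A =====
def pvFindA (sev desc loc : String) : List (String × Option String) :=
  [("severity", some sev), ("type", some "Security Issue"), ("description", some desc),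
   ("location", some loc), ("line", none)]
def pvAddDesc (f : List (String × Option String)) (x : String) : List (String × Option String) :=
  f.map (fun kv => if kv.1 == "description" then (kv.1, some (kv.2.getD "" ++ x)) else kv)
def pvStepA (loc : String)
    (st : List (List (String × Option String)) × Option (List (String × Option String)))
    (line : String) :
    List (List (String × Option String)) × Option (List (String × Option String)) :=
  if ["high", "critical", "severe"].any (fun s => PySem.Str.isIn s (PySem.Str.lower line)) then
    ((match st.2 with | some f => st.1 ++ [f] | none => st.1),
     some (pvFindA "HIGH" (PySem.Str.strip line) loc))
  else if ["medium", "moderate"].any (fun s => PySem.Str.isIn s (PySem.Str.lower line)) then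
    ((match st.2 with | some f => st.1 ++ [f] | none => st.1),
     some (pvFindA "MEDIUM" (PySem.Str.strip line) loc))
  else if ["low", "minor", "info"].any (fun s => PySem.Str.isIn s (PySem.Str.lower line)) then
    ((match st.2 with | some f => st.1 ++ [f] | none => st.1),
     some (pvFindA "LOW" (PySem.Str.strip line) loc))
  else
    match st.2 with
    | some f =>
        if PySem.Str.strip line ≠ "" then (st.1, some (pvAddDesc f (" " ++ PySem.Str.strip line)))
        else (st.1, some f)
    | none => (st.1, none)
def pvClassify (line : String) : Option String :=
  if ["high", "critical", "severe"].any (fun k => PySem.Str.isIn k (PySem.Str.lower line)) then some "HIGH"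
  else if ["medium", "moderate"].any (fun k => PySem.Str.isIn k (PySem.Str.lower line)) then some "MEDIUM"
  else if ["low", "minor", "info"].any (fun k => PySem.Str.isIn k (PySem.Str.lower line)) then some "LOW"
  else none
def pvSegment : List String → List (String × String × List String) → List (String × String × List String)
  | [], acc => acc
  | line :: rest, acc =>
    match pvClassify line with
    | some sev => pvSegment rest ((sev, line, []) :: acc)
    | none =>
      match acc with
      | [] => pvSegment rest []
      | b :: bs =>
          if PySem.Str.strip line ≠ "" then pvSegment rest ((b.1, b.2.1, line :: b.2.2) :: bs)
          else pvSegment rest (b :: bs)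
def pvRender (loc : String) (b : String × String × List String) : List (String × Option String) :=
  [("severity", some b.1), ("type", some "Security Issue"),
   ("description", some (PySem.Str.join " " (PySem.Str.strip b.2.1 :: b.2.2.reverse.map PySem.Str.strip))),
   ("location", some loc), ("line", none)]

-- 'if current_finding: findings.append(current_finding)' (A's dicts are nonempty, hence truthy)
def pvFinishA (st : List (List (String × Option String)) × Option (List (String × Option String))) :
    List (List (String × Option String)) :=
  match st.2 with | some f => st.1 ++ [f] | none => st.1

def parse_alprina_result_py (result : String) (metadata : List (String × String)) : List (List (String × Option String)) :=
  -- result.split('\n'): the separator is the nonempty literal "\n", so split? is always some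
  let lines := (PySem.Str.split? result "\n").getD []
  let loc := PySem.Dict.getD (PySem.Dict.mk metadata) "file" "unknown"
  let findings := pvFinishA (lines.foldl (pvStepA loc) ([], none))
  if findings.isEmpty && decide (PySem.Str.len result > 50) then
    [[("severity", some "INFO"), ("type", some "Analysis Complete"),
      ("description", some (PySem.Str.slice result none (some 500))),
      ("location", some loc), ("line", none)]]
  else findings

def parse_alprina_result_py_alt (result : String) (metadata : List (String × String)) : List (List (String × Option String)) :=
  let loc := PySem.Dict.getD (PySem.Dict.mk metadata) "file" "unknown"
  let blocks := (pvSegment ((PySem.Str.split? result "\n").getD []) []).reverse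
  let findings := blocks.map (pvRender loc)
  if findings.isEmpty && decide (PySem.Str.len result > 50) then
    [[("severity", some "INFO"), ("type", some "Analysis Complete"),
      ("description", some (PySem.Str.slice result none (some 500))),
      ("location", some loc), ("line", none)]]
  else findings

-- ===== PRECONDITION & SPEC =====
def Spec_parse_alprina_result_py (result : String) (metadata : List (String × String)) (out : List (List (String × Option String))) : Prop := out = parse_alprina_result_py_alt result metadata
instance (result : String) (metadata : List (String × String)) (out : List (List (String × Option String))) : Decidable (Spec_parse_alprina_result_py result metadata out) := by unfold Spec_parse_alprina_result_py; infer_instance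

-- ===== CLAIM (what is proved, stated in full; the proofs are below) =====
def Claim_equal_parse_alprina_result_py : Prop := ∀ (result : String) (metadata : List (String × String)), Dom_parse_alprina_result_py result metadata → Spec_parse_alprina_result_py result metadata (parse_alprina_result_py result metadata)

-- ===== LEMMAS AND PROOFS =====
theorem stepA_eq (loc line : String)
    (st : List (List (String × Option String)) × Option (List (String × Option String))) :
    pvStepA loc st line =
      match pvClassify line with
      | some sev => ((match st.2 with | some f => st.1 ++ [f] | none => st.1),
                     some (pvFindA sev (PySem.Str.strip line) loc))
      | none =>
        match st.2 with
        | some f =>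
            if PySem.Str.strip line ≠ "" then (st.1, some (pvAddDesc f (" " ++ PySem.Str.strip line)))
            else (st.1, some f)
        | none => (st.1, none) := by
  unfold pvStepA pvClassify
  split_ifs <;> rfl
theorem chars_join_cons_cons (sep a b : List Char) (bs : List (List Char)) :
    PySem.Chars.join sep (a :: b :: bs) = a ++ sep ++ PySem.Chars.join sep (b :: bs) := by
  show sep.intercalate (a :: b :: bs) = a ++ sep ++ sep.intercalate (b :: bs)
  simp [List.intercalate, List.intersperse]
theorem chars_join_append_singleton (sep y : List Char) :
    ∀ (a : List Char) (as : List (List Char)),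
    PySem.Chars.join sep (a :: (as ++ [y])) = PySem.Chars.join sep (a :: as) ++ sep ++ y := by
  intro a as
  induction as generalizing a with
  | nil => simp [chars_join_cons_cons]
  | cons b bs ih =>
    rw [List.cons_append, chars_join_cons_cons, chars_join_cons_cons, ih b]
    simp [List.append_assoc]
theorem str_join_append_singleton (x : String) (xs : List String) (y : String) :
    PySem.Str.join " " (x :: (xs ++ [y])) = PySem.Str.join " " (x :: xs) ++ " " ++ y := by
  apply String.ext
  simp only [PySem.Str.toList_join, List.map_cons, List.map_append, List.map_nil,
    String.toList_append]
  rw [chars_join_append_singleton]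
theorem str_join_singleton (x : String) : PySem.Str.join " " [x] = x := by
  apply String.ext
  simp [PySem.Str.toList_join]
theorem addDesc_find (sev desc loc x : String) :
    pvAddDesc (pvFindA sev desc loc) x = pvFindA sev (desc ++ x) loc := by
  simp [pvAddDesc, pvFindA]
theorem addDesc_render (loc line : String) (b : String × String × List String) :
    pvAddDesc (pvRender loc b) (" " ++ PySem.Str.strip line)
      = pvRender loc (b.1, b.2.1, line :: b.2.2) := by
  show pvAddDesc (pvFindA b.1 _ loc) _ = pvFindA b.1 _ loc
  rw [addDesc_find]
  simp only [pvFindA, List.reverse_cons, List.map_append, List.map_cons, List.map_nil]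
  rw [str_join_append_singleton]
  simp [String.append_assoc]
theorem render_new (loc sev line : String) :
    pvRender loc (sev, line, []) = pvFindA sev (PySem.Str.strip line) loc := by
  simp [pvRender, pvFindA, str_join_singleton]
theorem key_loop (lines : List String) (loc : String) (fs0 : List (List (String × Option String)))
    (acc : List (String × String × List String)) :
    pvFinishA (lines.foldl (pvStepA loc)
        (fs0 ++ ((acc.drop 1).reverse.map (pvRender loc)), acc.head?.map (pvRender loc)))
      = fs0 ++ (pvSegment lines acc).reverse.map (pvRender loc) := by
  induction lines generalizing acc with
  | nil =>
    cases acc with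
    | nil => simp [pvFinishA, pvSegment]
    | cons b bs => simp [pvFinishA, pvSegment]
  | cons line rest ih =>
    rw [List.foldl_cons, stepA_eq]
    cases hcl : pvClassify line with
    | some sev =>
      simp only [pvSegment, hcl]
      cases acc with
      | nil =>
        have := ih [(sev, line, [])]
        simp only [List.drop_succ_cons, List.drop_zero, List.head?_cons, Option.map_some,
          render_new] at this
        simpa [render_new] using this
      | cons b bs =>
        have := ih ((sev, line, []) :: (b :: bs))
        simp only [List.drop_succ_cons, List.drop_zero, List.head?_cons, Option.map_some,
          render_new] at this
        simp only [List.drop_succ_cons, List.drop_zero, List.head?_cons, Option.map_some]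
        rw [← this]
        simp [List.reverse_cons]
    | none =>
      simp only [pvSegment, hcl]
      cases acc with
      | nil => simpa using ih []
      | cons b bs =>
        by_cases hs : PySem.Str.strip line = ""
        · simpa [hs] using ih (b :: bs)
        · simpa [hs, addDesc_render] using ih ((b.1, b.2.1, line :: b.2.2) :: bs)

-- ===== VERDICT (by name: the statement is the Claim_ definition above) =====
theorem parse_alprina_result_py_spec : Claim_equal_parse_alprina_result_py := by
  intro result metadata _
  unfold Spec_parse_alprina_result_py parse_alprina_result_py parse_alprina_result_py_alt
  have h := key_loop ((PySem.Str.split? result "\n").getD [])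
      (PySem.Dict.getD (PySem.Dict.mk metadata) "file" "unknown") [] []
  simp only [List.drop_nil, List.reverse_nil, List.map_nil, List.nil_append, List.head?_nil,
    Option.map_none] at h
  simp only [h]
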